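-- pv_equiv track=rewrite | github.com/Katrinadevlop/Excel_menu | excel_menu_gui/app/services/comparator.py | col_to_index0
-- ===== SOURCE A (Python) =====
-- class ColumnParseError(ValueError):
--     pass
--
-- def col_to_index0(col: str) -> int:
--     s = col.strip()
--     if not s:
--         raise ColumnParseError("Колонка не указана")
--     if s.isdigit():
--         n = int(s)
--         if n <= 0:
--             raise ColumnParseError("Номер колонки должен быть > 0")
--         return n - 1
--     acc = 0
--     for ch in s.upper():
--         if not ('A' <= ch <= 'Z'):
--             raise ColumnParseError("Некорректная колонка. Пример: A, B, 1, 2, AA")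
--         acc = acc * 26 + (ord(ch) - ord('A') + 1)
--     return acc - 1
-- ===== SOURCE B (Python) =====
-- class ColumnParseError(ValueError):
--     pass
--
-- def col_to_index0(col: str) -> int:
--     # Staged decomposition: validate all letters up front, map to digits, build the
--     # table of powers of 26 once, then take a zip dot-product of the reversed digit
--     # list with the power table (no Horner accumulator loop).
--     s = col.strip()
--     if not s:
--         raise ColumnParseError("Колонка не указана")
--     if s.isdigit():
--         n = int(s)
--         if n <= 0:
--             raise ColumnParseError("Номер колонки должен быть > 0")
--         return n - 1
--     u = s.upper()
--     if not all('A' <= c <= 'Z' for c in u):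
--         raise ColumnParseError("Некорректная колонка. Пример: A, B, 1, 2, AA")
--     digits = [ord(c) - ord('A') + 1 for c in u]
--     powers = []
--     p = 1
--     for _ in digits:
--         powers.append(p)
--         p *= 26
--     return sum(d * w for d, w in zip(reversed(digits), powers)) - 1
-- ===== Notes on version B (the rewrite author's own statement) =====
-- stated objective: alternative
-- what changed: The letters branch is split into staged passes - whole-string validation, digit mapping, a power-of-26 table, then a zip dot-product of the reversed digits with that table - replacing A's single forward Horner loop with per-character validation.
import Mathlib
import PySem

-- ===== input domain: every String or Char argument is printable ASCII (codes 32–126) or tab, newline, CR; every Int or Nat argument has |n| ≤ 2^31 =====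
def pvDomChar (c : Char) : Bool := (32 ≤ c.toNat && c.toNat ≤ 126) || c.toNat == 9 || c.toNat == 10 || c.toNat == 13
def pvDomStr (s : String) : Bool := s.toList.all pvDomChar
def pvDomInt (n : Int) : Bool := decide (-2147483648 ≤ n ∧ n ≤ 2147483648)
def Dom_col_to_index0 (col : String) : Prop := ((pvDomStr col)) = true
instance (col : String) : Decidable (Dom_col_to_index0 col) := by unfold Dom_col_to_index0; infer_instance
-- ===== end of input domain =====

-- B replaces A's single forward Horner loop (validate+accumulate per char) by staged
-- passes: whole-string validation, digit mapping, then a positional power sum over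
-- the reversed digit list; equivalence of return values on Pre_.

-- ===== PORT A =====
-- forward Horner loop: raising is modelled by the Option state going to none
def aStep (st : Option Int) (ch : Char) : Option Int :=
  match st with
  | none => none
  | some acc =>
      if 'A' ≤ ch ∧ ch ≤ 'Z' then some (acc * 26 + ((ch.toNat : Int) - 65 + 1)) else none

def col_to_index0 (col : String) : Int :=
  let s := PySem.Str.strip col
  if s.toList = [] then 0          -- Python raises ColumnParseError here (outside Pre_)
  else if PySem.Str.strIsdigit s then
    let n := (PySem.Int.ofStr? s).getD 0
    if n ≤ 0 then 0                -- Python raises ColumnParseError here (outside Pre_)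
    else n - 1
  else
    match (PySem.Str.upper s).toList.foldl aStep (some 0) with
    | some acc => acc - 1
    | none => 0                    -- Python raises ColumnParseError here (outside Pre_)

-- ===== PORT B =====
-- staged passes: all-validation, digit map, powers-of-26 table, zip dot-product.
def powStep (st : List Int × Int) (_ : Int) : List Int × Int :=
  (st.1 ++ [st.2], st.2 * 26)

def col_to_index0_alt (col : String) : Int :=
  let s := PySem.Str.strip col
  if s.toList = [] then 0          -- Python raises ColumnParseError here (outside Pre_)
  else if PySem.Str.strIsdigit s then
    let n := (PySem.Int.ofStr? s).getD 0
    if n ≤ 0 then 0                -- Python raises ColumnParseError here (outside Pre_)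
    else n - 1
  else
    let u := (PySem.Str.upper s).toList
    if u.all (fun c => decide ('A' ≤ c) && decide (c ≤ 'Z')) then
      let digits := u.map (fun c => (c.toNat : Int) - 65 + 1)
      let powers := (digits.foldl powStep ([], 1)).1
      ((digits.reverse.zip powers).map (fun p => p.1 * p.2)).sum - 1
    else 0                         -- Python raises ColumnParseError here (outside Pre_)

-- ===== PRECONDITION & SPEC =====
-- Pre_ admits exactly the inputs where A returns normally: nonempty after strip, and
-- either a positive digit string or all-letters after uppercasing (else A raises ColumnParseError).
def Pre_col_to_index0 (col : String) : Prop :=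
  (PySem.Str.strip col).toList ≠ [] ∧
  (if PySem.Str.strIsdigit (PySem.Str.strip col) then
     0 < (PySem.Int.ofStr? (PySem.Str.strip col)).getD 0
   else
     ((PySem.Str.upper (PySem.Str.strip col)).toList.all (fun ch => 'A' ≤ ch && ch ≤ 'Z')) = true)

instance (col : String) : Decidable (Pre_col_to_index0 col) := by
  unfold Pre_col_to_index0; infer_instance

def pvWitness_col_to_index0 : String := "AB"

def Spec_col_to_index0 (col : String) (out : Int) : Prop := out = col_to_index0_alt col
instance (col : String) (out : Int) : Decidable (Spec_col_to_index0 col out) := by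
  unfold Spec_col_to_index0; infer_instance

-- ===== CLAIM (what is proved, stated in full; the proofs are below) =====
def Claim_equal_col_to_index0 : Prop :=
  ∀ (col : String), Dom_col_to_index0 col → Pre_col_to_index0 col →
    Spec_col_to_index0 col (col_to_index0 col)

-- ===== LEMMAS AND PROOFS =====

/-- the base-26 value of a letter list (positional form) -/
def colVal : List Char → Int
  | [] => 0
  | c :: tl => ((c.toNat : Int) - 65 + 1) * 26 ^ tl.length + colVal tl

theorem foldA (l : List Char) (h : ∀ c ∈ l, 'A' ≤ c ∧ c ≤ 'Z') :
    ∀ a : Int, l.foldl aStep (some a) = some (a * 26 ^ l.length + colVal l) := by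
  induction l with
  | nil => intro a; simp [colVal]
  | cons c tl ih =>
      intro a
      have hc := h c (List.mem_cons_self ..)
      have htl : ∀ c ∈ tl, 'A' ≤ c ∧ c ≤ 'Z' := fun x hx => h x (List.mem_cons_of_mem _ hx)
      simp only [List.foldl_cons, aStep, if_pos hc, ih htl, colVal, List.length_cons]
      congr 1
      ring

theorem powersEq (l : List Int) :
    ∀ (ps : List Int) (p : Int),
      l.foldl powStep (ps, p)
        = (ps ++ (List.range l.length).map (fun i => p * 26 ^ i), p * 26 ^ l.length) := by
  induction l with
  | nil => intro ps p; simp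
  | cons x tl ih =>
      intro ps p
      rw [List.foldl_cons]
      show tl.foldl powStep (ps ++ [p], p * 26) = _
      rw [ih]
      rw [Prod.mk.injEq]
      constructor
      · rw [List.append_assoc]
        congr 1
        rw [List.length_cons, List.range_succ_eq_map, List.map_cons, List.map_map]
        simp only [pow_zero, mul_one, List.cons_append, List.nil_append, List.cons.injEq,
          true_and]
        congr 1
        funext i
        simp only [Function.comp_apply, pow_succ]
        ring
      · rw [List.length_cons, pow_succ]
        ring

theorem sumZip (l : List Char) :
    (((l.map (fun c => (c.toNat : Int) - 65 + 1)).reverse.zip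
        ((List.range l.length).map (fun i => (1 : Int) * 26 ^ i))).map
      (fun p => p.1 * p.2)).sum = colVal l := by
  induction l with
  | nil => simp [colVal]
  | cons c tl ih =>
      rw [List.map_cons, List.reverse_cons, List.length_cons, List.range_succ,
        List.map_append,
        List.zip_append (by simp), List.map_append, List.sum_append, ih]
      simp [colVal]
      ring

-- ===== VERDICT (by name: the statement is the Claim_ definition above) =====
theorem col_to_index0_spec : Claim_equal_col_to_index0 := by
  intro col _ hpre
  obtain ⟨hne, hbr⟩ := hpre
  unfold Spec_col_to_index0 col_to_index0 col_to_index0_alt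
  simp only [if_neg hne]
  by_cases hd : PySem.Str.strIsdigit (PySem.Str.strip col)
  · simp only [if_pos hd]
  · rw [if_neg hd, if_neg hd]
    rw [if_neg hd] at hbr
    have hbr' := hbr
    simp only [List.all_eq_true, Bool.and_eq_true, decide_eq_true_eq] at hbr'
    rw [if_pos (by simpa using hbr), foldA _ hbr' 0, powersEq]
    simp only [List.nil_append, List.length_map]
    rw [sumZip]
    simp
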